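-- pv_equiv track=rewrite | github.com/charlotteturner21/potbs-econ-calculator | scripts/filter_structures.py | is_structure_name
-- ===== SOURCE A (Python) =====
-- def is_structure_name(name):
--     """
--     Check if a name appears to be a PotBS structure.
--
--     Args:
--         name (str): The name to check
--
--     Returns:
--         bool: True if this appears to be a structure
--     """
--     # Common structure types and keywords
--     structure_keywords = [
--         'forge', 'mine', 'plantation', 'quarry', 'shipyard', 'logging camp',
--         'lumber mill', 'distillery', 'brewery', 'refinery', 'mill', 'camp',
--         'lodge', 'yard', 'office', 'smelter', 'tannery', 'textile',
--         'advanced', 'master', 'basic', 'company', 'assembly', 'careening',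
--         'draughtsman', 'fishing', 'hunting', 'powder', 'sugar', 'pasture'
--     ]
--
--     # Material/resource names that appear in structure names
--     materials = [
--         'copper', 'iron', 'gold', 'silver', 'zinc', 'sulfur', 'coal',
--         'ironwood', 'oak', 'teak', 'fir', 'granite', 'limestone', 'marble',
--         'cotton', 'sugar', 'tobacco', 'cacao', 'coffee', 'prickly pear',
--         'general', 'gravel', 'small', 'medium', 'large'
--     ]
--
--     name_lower = name.lower()
--
--     # Check if name contains structure keywords
--     for keyword in structure_keywords:
--         if keyword in name_lower:
--             return True
--
--     # Check if name contains materials (often part of structure names)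
--     for material in materials:
--         if f'({material})' in name_lower or f' {material} ' in name_lower:
--             return True
--
--     return False
-- ===== SOURCE B (Python) =====
-- _STRUCTURE_KEYWORDS = [
--     'forge', 'mine', 'plantation', 'quarry', 'shipyard', 'logging camp',
--     'lumber mill', 'distillery', 'brewery', 'refinery', 'mill', 'camp',
--     'lodge', 'yard', 'office', 'smelter', 'tannery', 'textile',
--     'advanced', 'master', 'basic', 'company', 'assembly', 'careening',
--     'draughtsman', 'fishing', 'hunting', 'powder', 'sugar', 'pasture'
-- ]
--
-- _MATERIALS = [
--     'copper', 'iron', 'gold', 'silver', 'zinc', 'sulfur', 'coal',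
--     'ironwood', 'oak', 'teak', 'fir', 'granite', 'limestone', 'marble',
--     'cotton', 'sugar', 'tobacco', 'cacao', 'coffee', 'prickly pear',
--     'general', 'gravel', 'small', 'medium', 'large'
-- ]
--
-- # One flat pattern list built once (keywords, '(mat)' and ' mat ' forms).
-- _PATTERNS = (_STRUCTURE_KEYWORDS
--              + ['(' + m + ')' for m in _MATERIALS]
--              + [' ' + m + ' ' for m in _MATERIALS])
--
--
-- def is_structure_name(name):
--     # Online multi-pattern matcher: one pass over the lowered name, carrying
--     # the set of partial matches in progress ('active' = suffixes of patterns
--     # still to be consumed).  No substring searches at all: each character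
--     # advances every live partial match and starts fresh ones; a partial
--     # match that empties out means some pattern occurred.
--     active = []
--     for ch in name.lower():
--         active = [p[1:] for p in _PATTERNS + active if p[:1] == ch]
--         if '' in active:
--             return True
--     return False
-- ===== Notes on version B (the rewrite author's own statement) =====
-- stated objective: alternative
-- what changed: Replaced A's per-pattern substring searches over two constant lists by an online multi-pattern matcher: a single pass over the lowered name carrying an accumulator of active partial-match suffixes (NFA-style simultaneous matching), with no substring search primitive at all.
import Mathlib
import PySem

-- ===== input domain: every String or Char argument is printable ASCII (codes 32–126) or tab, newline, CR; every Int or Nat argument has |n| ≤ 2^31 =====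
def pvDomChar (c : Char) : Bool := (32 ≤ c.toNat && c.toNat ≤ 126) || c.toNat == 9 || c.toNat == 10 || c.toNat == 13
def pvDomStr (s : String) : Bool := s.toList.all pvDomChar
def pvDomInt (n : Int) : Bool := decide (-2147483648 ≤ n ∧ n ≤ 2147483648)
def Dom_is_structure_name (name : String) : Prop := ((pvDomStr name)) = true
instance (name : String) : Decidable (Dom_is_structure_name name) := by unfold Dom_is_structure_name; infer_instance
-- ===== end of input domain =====

-- B replaces A's per-pattern substring searches by an online multi-pattern matcher:
-- one pass over the lowered name carrying the suffixes of patterns still being matched; objective: alternative.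

-- ===== PORT A =====
def pvKeywordsA : List (List Char) :=
  (["forge", "mine", "plantation", "quarry", "shipyard", "logging camp",
    "lumber mill", "distillery", "brewery", "refinery", "mill", "camp",
    "lodge", "yard", "office", "smelter", "tannery", "textile",
    "advanced", "master", "basic", "company", "assembly", "careening",
    "draughtsman", "fishing", "hunting", "powder", "sugar", "pasture"]).map String.toList

def pvMaterialsA : List (List Char) :=
  (["copper", "iron", "gold", "silver", "zinc", "sulfur", "coal",
    "ironwood", "oak", "teak", "fir", "granite", "limestone", "marble",
    "cotton", "sugar", "tobacco", "cacao", "coffee", "prickly pear",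
    "general", "gravel", "small", "medium", "large"]).map String.toList

def is_structure_name (name : String) : Bool :=
  let name_lower := PySem.Chars.lower name.toList
  -- first loop: keyword in name_lower, early return True
  (pvKeywordsA.any (fun keyword => PySem.Chars.isIn keyword name_lower)) ||
  -- second loop: f'({material})' in name_lower or f' {material} ' in name_lower
  (pvMaterialsA.any (fun material =>
      PySem.Chars.isIn ('(' :: material ++ [')']) name_lower ||
      PySem.Chars.isIn (' ' :: material ++ [' ']) name_lower))

-- ===== PORT B =====
def pvKeywordsB : List (List Char) :=
  (["forge", "mine", "plantation", "quarry", "shipyard", "logging camp",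
    "lumber mill", "distillery", "brewery", "refinery", "mill", "camp",
    "lodge", "yard", "office", "smelter", "tannery", "textile",
    "advanced", "master", "basic", "company", "assembly", "careening",
    "draughtsman", "fishing", "hunting", "powder", "sugar", "pasture"]).map String.toList

def pvMaterialsB : List (List Char) :=
  (["copper", "iron", "gold", "silver", "zinc", "sulfur", "coal",
    "ironwood", "oak", "teak", "fir", "granite", "limestone", "marble",
    "cotton", "sugar", "tobacco", "cacao", "coffee", "prickly pear",
    "general", "gravel", "small", "medium", "large"]).map String.toList

-- the flat pattern list _PATTERNS of Source B
def pvPatterns : List (List Char) :=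
  pvKeywordsB ++ pvMaterialsB.map (fun m => '(' :: m ++ [')'])
             ++ pvMaterialsB.map (fun m => ' ' :: m ++ [' '])

-- the loop body: active = [p[1:] for p in _PATTERNS + active if p[:1] == ch]
-- (p[:1] == ch for a 1-char ch iff p is nonempty with head ch)
def pvAdvance (c : Char) (cands : List (List Char)) : List (List Char) :=
  cands.filterMap (fun p =>
    match p with
    | d :: rest => if d = c then some rest else none
    | [] => none)

-- the loop: for ch in low: active = advance; if '' in active: return True; return False
def pvRun : List (List Char) → List Char → Bool
  | _, [] => false
  | active, c :: t =>
    let nxt := pvAdvance c (pvPatterns ++ active)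
    if nxt.contains ([] : List Char) then true else pvRun nxt t

def is_structure_name_alt (name : String) : Bool :=
  pvRun [] (PySem.Chars.lower name.toList)

-- ===== PRECONDITION & SPEC =====
def Spec_is_structure_name (name : String) (out : Bool) : Prop := out = is_structure_name_alt name
instance (name : String) (out : Bool) : Decidable (Spec_is_structure_name name out) := by unfold Spec_is_structure_name; infer_instance

-- ===== CLAIM (what is proved, stated in full; the proofs are below) =====
def Claim_equal_is_structure_name : Prop := ∀ (name : String), Dom_is_structure_name name → Spec_is_structure_name name (is_structure_name name)

-- ===== LEMMAS AND PROOFS =====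

theorem pvPatterns_ne_nil : ∀ p ∈ pvPatterns, p ≠ [] := by decide

-- membership in one advance step
theorem mem_pvAdvance (c : Char) (cands : List (List Char)) (a : List Char) :
    a ∈ pvAdvance c cands ↔ c :: a ∈ cands := by
  unfold pvAdvance
  rw [List.mem_filterMap]
  constructor
  · rintro ⟨p, hp, hfa⟩
    match p with
    | [] => simp at hfa
    | d :: rest =>
      by_cases hd : d = c
      · subst hd
        obtain rfl : rest = a := by simpa using hfa
        exact hp
      · simp [hd] at hfa
  · intro h
    exact ⟨c :: a, h, by simp⟩

-- the online matcher finds a match iff some pattern is a prefix of some suffix of the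
-- unread input, or some active partial match completes against the unread input
theorem pvRun_iff (s : List Char) : ∀ active : List (List Char),
    pvRun active s = true ↔
      (∃ p ∈ pvPatterns, ∃ j, p <+: s.drop j) ∨
      (∃ a ∈ active, a ≠ [] ∧ a <+: s) := by
  induction s with
  | nil =>
    intro active
    simp only [pvRun, List.drop_nil]
    constructor
    · intro h; exact absurd h (by simp)
    · rintro (⟨p, hp, j, hpre⟩ | ⟨a, _, hne, hpre⟩)
      · exact absurd (List.prefix_nil.mp hpre) (pvPatterns_ne_nil p hp)
      · exact absurd (List.prefix_nil.mp hpre) hne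
  | cons c t ih =>
    intro active
    simp only [pvRun]
    by_cases hnil : ([] : List Char) ∈ pvAdvance c (pvPatterns ++ active)
    · rw [if_pos (by simpa [List.contains_iff_mem] using hnil)]
      rw [mem_pvAdvance, List.mem_append] at hnil
      constructor
      · intro _
        rcases hnil with h | h
        · exact Or.inl ⟨[c], h, 0, by simp⟩
        · exact Or.inr ⟨[c], h, by simp, by simp⟩
      · intro _; rfl
    · rw [if_neg (by simpa using hnil)]
      rw [ih]
      constructor
      · rintro (⟨p, hp, j, hpre⟩ | ⟨a, ha, hane, hpre⟩)
        · exact Or.inl ⟨p, hp, j + 1, by simpa using hpre⟩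
        · rw [mem_pvAdvance, List.mem_append] at ha
          rcases ha with h | h
          · exact Or.inl ⟨c :: a, h, 0, by simpa using hpre⟩
          · exact Or.inr ⟨c :: a, h, by simp, by simpa using hpre⟩
      · rintro (⟨p, hp, j, hpre⟩ | ⟨a, ha, hane, hpre⟩)
        · cases j with
          | zero =>
            simp only [List.drop_zero] at hpre
            match p, pvPatterns_ne_nil p hp with
            | d :: rest, _ =>
              obtain ⟨hd, hrest⟩ : d = c ∧ rest <+: t := by
                rcases hpre with ⟨u, hu⟩; cases hu; exact ⟨rfl, ⟨u, rfl⟩⟩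
              subst hd
              have hmem : rest ∈ pvAdvance d (pvPatterns ++ active) := by
                rw [mem_pvAdvance, List.mem_append]; exact Or.inl hp
              cases rest with
              | nil => exact absurd hmem hnil
              | cons e es => exact Or.inr ⟨e :: es, hmem, by simp, hrest⟩
          | succ j => exact Or.inl ⟨p, hp, j, by simpa using hpre⟩
        · match a, hane with
          | d :: rest, _ =>
            obtain ⟨hd, hrest⟩ : d = c ∧ rest <+: t := by
              rcases hpre with ⟨u, hu⟩; cases hu; exact ⟨rfl, ⟨u, rfl⟩⟩
            subst hd
            have hmem : rest ∈ pvAdvance d (pvPatterns ++ active) := by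
              rw [mem_pvAdvance, List.mem_append]; exact Or.inr ha
            cases rest with
            | nil => exact absurd hmem hnil
            | cons e es => exact Or.inr ⟨e :: es, hmem, by simp, hrest⟩

theorem is_structure_name_spec' (name : String) :
    is_structure_name name = is_structure_name_alt name := by
  unfold is_structure_name is_structure_name_alt
  set low := PySem.Chars.lower name.toList with hlow
  rw [Bool.eq_iff_iff, pvRun_iff low []]
  simp only [List.not_mem_nil, false_and, exists_false, or_false]
  simp only [Bool.or_eq_true, List.any_eq_true, pvPatterns, List.mem_append, List.mem_map]
  constructor
  · rintro (⟨k, hk, hin⟩ | ⟨m, hm, hin | hin⟩)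
    · exact ⟨k, Or.inl (Or.inl hk),
        (PySem.Chars.exists_prefix_drop_iff_isIn k low).mpr hin⟩
    · exact ⟨'(' :: m ++ [')'], Or.inl (Or.inr ⟨m, hm, rfl⟩),
        (PySem.Chars.exists_prefix_drop_iff_isIn _ low).mpr hin⟩
    · exact ⟨' ' :: m ++ [' '], Or.inr ⟨m, hm, rfl⟩,
        (PySem.Chars.exists_prefix_drop_iff_isIn _ low).mpr hin⟩
  · rintro ⟨p, (hk | ⟨m, hm, rfl⟩) | ⟨m, hm, rfl⟩, hj⟩
    · exact Or.inl ⟨p, hk, (PySem.Chars.exists_prefix_drop_iff_isIn p low).mp hj⟩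
    · exact Or.inr ⟨m, hm, Or.inl ((PySem.Chars.exists_prefix_drop_iff_isIn _ low).mp hj)⟩
    · exact Or.inr ⟨m, hm, Or.inr ((PySem.Chars.exists_prefix_drop_iff_isIn _ low).mp hj)⟩

-- ===== VERDICT (by name: the statement is the Claim_ definition above) =====
theorem is_structure_name_spec : Claim_equal_is_structure_name := by
  intro name _
  exact is_structure_name_spec' name
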